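-- pv_equiv track=rewrite | github.com/kannanParamasivam/datastructures_and_algorithm | temp.py | solution
-- ===== SOURCE A (Python) =====
-- def solution(S, T):
--
--     s1 = convert_to_string(S)
--     s2 = convert_to_string(T)
--
--     if len(s1) != len(s2):
--         return False
--
--     for i, c in enumerate(s1):
--
--         if c != '?' and s2[i] != '?' and c != s2[i]:
--             return False
--
--     return True
--
-- def convert_to_string(val):
--
--     res = []
--
--     for c in val:
--         if c.isalpha():
--             res.append(c)
--         else:
--             v = ['?'] * int(c)
--             res.extend(v)
--
--     return res
-- ===== SOURCE B (Python) =====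
-- def solution(S, T):
--     n1, d1 = _index(S)
--     n2, d2 = _index(T)
--     if n1 != n2:
--         return False
--     for p, c in d1.items():
--         q = d2.get(p)
--         if q is not None and q != c:
--             return False
--     return True
--
-- def _index(val):
--     pos = 0
--     d = {}
--     for c in val:
--         if c.isalpha():
--             d[pos] = c
--             pos += 1
--         else:
--             pos += int(c)
--     return pos, d
-- ===== Notes on version B (the rewrite author's own statement) =====
-- stated objective: alternative
-- what changed: B never builds the wildcard-expanded lists: it indexes each string in one pass into (total expanded length, dict position->letter) and compares the two letter maps, instead of materializing '?'-runs and scanning the expansions position by position.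
import Mathlib
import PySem

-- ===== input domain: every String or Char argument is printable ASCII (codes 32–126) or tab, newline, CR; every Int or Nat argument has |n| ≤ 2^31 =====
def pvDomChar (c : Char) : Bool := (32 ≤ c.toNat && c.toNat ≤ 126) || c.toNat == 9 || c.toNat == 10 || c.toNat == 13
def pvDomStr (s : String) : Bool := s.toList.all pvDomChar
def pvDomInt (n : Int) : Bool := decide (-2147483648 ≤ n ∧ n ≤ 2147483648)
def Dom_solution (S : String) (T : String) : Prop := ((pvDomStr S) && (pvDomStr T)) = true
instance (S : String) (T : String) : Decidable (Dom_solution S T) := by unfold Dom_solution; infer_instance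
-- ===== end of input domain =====

-- B indexes each string into (expanded length, position→letter map) instead of building the
-- '?'-expanded lists A compares; proved to return A's exact value wherever A returns (Pre_).


-- ===== PORT A =====
-- int(str(c)) for a single character c: exact on the ASCII domain (succeeds iff c is '0'..'9').
def pyIntChar? (c : Char) : Option Int :=
  if 48 ≤ c.toNat ∧ c.toNat ≤ 57 then some ((c.toNat : Int) - 48) else none

-- convert_to_string: the for-loop threading res; none = ValueError from int(c)
def convA : List Char → List Char → Option (List Char)
  | [], res => some res
  | c :: rest, res =>
    if c.isAlpha then convA rest (res ++ [c])
    else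
      match pyIntChar? c with
      | none => none
      | some n => convA rest (res ++ PySem.List.pyRepeat ['?'] n)

-- the 'for i, c in enumerate(s1)' loop of A
def loopA (s2 : List Char) : List Char → Int → Bool
  | [], _ => true
  | c :: rest, i =>
    match PySem.List.pyGet? s2 i with
    | none => false  -- IndexError (unreachable: lengths checked equal)
    | some d => if c ≠ '?' ∧ d ≠ '?' ∧ c ≠ d then false else loopA s2 rest (i + 1)

def solution (S : String) (T : String) : Bool :=
  match convA S.toList [], convA T.toList [] with
  | some s1, some s2 =>
    if (s1.length : Int) ≠ (s2.length : Int) then false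
    else loopA s2 s1 0
  | _, _ => false  -- ValueError: excluded by Pre_solution

-- ===== PORT B =====
-- int(str(c)) for a single character c, B's own copy: exact on the ASCII domain (succeeds iff c is '0'..'9').
def pyIntCharB? (c : Char) : Option Int :=
  if 48 ≤ c.toNat ∧ c.toNat ≤ 57 then some ((c.toNat : Int) - 48) else none

-- _index: one pass, total expanded length plus dict position → letter; none = ValueError from int(c)
def idxB : List Char → Int → PySem.Dict Int Char → Option (Int × PySem.Dict Int Char)
  | [], pos, d => some (pos, d)
  | c :: rest, pos, d =>
    if c.isAlpha then idxB rest (pos + 1) (d.insert pos c)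
    else
      match pyIntCharB? c with
      | none => none
      | some n => idxB rest (pos + n) d

-- the 'for p, c in d1.items()' loop of B
def loopB (d2 : PySem.Dict Int Char) : List (Int × Char) → Bool
  | [] => true
  | (p, c) :: rest =>
    match d2.get? p with
    | some q => if q ≠ c then false else loopB d2 rest
    | none => loopB d2 rest

def solution_alt (S : String) (T : String) : Bool :=
  match idxB S.toList 0 PySem.Dict.empty with
  | none => false  -- ValueError: excluded by Pre_solution
  | some (n1, d1) =>
    match idxB T.toList 0 PySem.Dict.empty with
    | none => false  -- ValueError: excluded by Pre_solution
    | some (n2, d2) => if n1 ≠ n2 then false else loopB d2 d1.items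

-- ===== PRECONDITION & SPEC =====
-- A raises ValueError (int(c)) exactly when some character of S or T is neither a letter nor a digit.
def Pre_solution (S : String) (T : String) : Prop :=
  (S.toList ++ T.toList).all (fun c => c.isAlpha || c.isDigit) = true
instance (S : String) (T : String) : Decidable (Pre_solution S T) := by unfold Pre_solution; infer_instance
def pvWitness_solution : String × String := ("ab2", "a3")

def Spec_solution (S : String) (T : String) (out : Bool) : Prop := out = solution_alt S T
instance (S : String) (T : String) (out : Bool) : Decidable (Spec_solution S T out) := by unfold Spec_solution; infer_instance

-- ===== CLAIM (what is proved, stated in full; the proofs are below) =====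
def Claim_equal_solution : Prop := ∀ (S : String) (T : String), Dom_solution S T → Pre_solution S T → Spec_solution S T (solution S T)

-- ===== LEMMAS AND PROOFS =====

-- letter at expanded position p ('?' and out-of-range give none)
def lAt (E : List Char) (p : Int) : Option Char :=
  if h : 0 ≤ p ∧ p.toNat < E.length then
    (if E[p.toNat]'h.2 = '?' then none else some (E[p.toNat]'h.2))
  else none

theorem convA_append (val : List Char) : ∀ res : List Char,
    convA val res = (convA val []).map (res ++ ·) := by
  induction val with
  | nil => intro res; simp [convA]
  | cons c rest ih =>
    intro res
    simp only [convA]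
    by_cases h : c.isAlpha
    · rw [if_pos h, if_pos h, ih (res ++ [c]), List.nil_append, ih [c]]
      cases convA rest [] <;> simp
    · rw [if_neg h, if_neg h]
      match hp : pyIntChar? c with
      | none => simp
      | some n =>
        simp only [List.nil_append]
        rw [ih (res ++ PySem.List.pyRepeat ['?'] n), ih (PySem.List.pyRepeat ['?'] n)]
        cases convA rest [] <;> simp

theorem lAt_some_iff (E : List Char) (p : Int) (c : Char) :
    lAt E p = some c ↔ 0 ≤ p ∧ ∃ h : p.toNat < E.length, E[p.toNat] = c ∧ c ≠ '?' := by
  unfold lAt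
  by_cases h : 0 ≤ p ∧ p.toNat < E.length
  · rw [dif_pos h]
    by_cases h2 : E[p.toNat]'h.2 = '?'
    · rw [if_pos h2]
      constructor
      · intro hc; exact absurd hc (by simp)
      · rintro ⟨h0, hl, hc, hne⟩; exact absurd (by rw [← hc]; exact h2) hne
    · rw [if_neg h2]
      simp only [Option.some.injEq]
      constructor
      · intro hc; exact ⟨h.1, h.2, hc, fun hq => h2 (by rw [hc]; exact hq)⟩
      · rintro ⟨h0, hl, hc, hne⟩; exact hc
  · rw [dif_neg h]
    constructor
    · intro hc; exact absurd hc (by simp)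
    · rintro ⟨h0, hl, hc, hne⟩; exact absurd ⟨h0, hl⟩ h

theorem lAt_nil (p : Int) : lAt [] p = none := by
  unfold lAt; rw [dif_neg (by simp)]

theorem lAt_cons_succ (x : Char) (E : List Char) (q : Int) (hq : 1 ≤ q) :
    lAt (x :: E) q = lAt E (q - 1) := by
  unfold lAt
  have hk : q.toNat = (q - 1).toNat + 1 := by omega
  by_cases h : 0 ≤ q - 1 ∧ (q - 1).toNat < E.length
  · rw [dif_pos h, dif_pos (⟨by omega, by simp only [List.length_cons]; omega⟩ :
      0 ≤ q ∧ q.toNat < (x :: E).length)]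
    simp only [hk, List.getElem_cons_succ]
  · rw [dif_neg h, dif_neg (by simp only [List.length_cons, not_and]; omega)]

theorem lAt_cons_zero (x : Char) (E : List Char) :
    lAt (x :: E) 0 = if x = '?' then none else some x := by
  unfold lAt
  rw [dif_pos (⟨le_refl 0, by simp⟩ : (0:Int) ≤ 0 ∧ (0:Int).toNat < (x :: E).length)]
  simp

theorem lAt_rep_append (n : Nat) (E : List Char) (q : Int) :
    lAt (List.replicate n '?' ++ E) q = if (n : Int) ≤ q then lAt E (q - n) else none := by
  unfold lAt
  by_cases hn : (n : Int) ≤ q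
  · rw [if_pos hn]
    by_cases h2 : 0 ≤ q - n ∧ (q - n).toNat < E.length
    · rw [dif_pos h2, dif_pos (⟨by omega, by
        simp only [List.length_append, List.length_replicate]; omega⟩ :
        0 ≤ q ∧ q.toNat < (List.replicate n '?' ++ E).length)]
      rw [List.getElem_append_right (by simp only [List.length_replicate]; omega)]
      simp only [List.length_replicate]
      have hk : q.toNat - n = (q - n).toNat := by omega
      simp only [hk]
    · rw [dif_neg h2, dif_neg (by
        simp only [List.length_append, List.length_replicate, not_and]; omega)]
  · rw [if_neg hn]
    by_cases h0 : 0 ≤ q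
    · rw [dif_pos (⟨h0, by simp only [List.length_append, List.length_replicate]; omega⟩ :
        0 ≤ q ∧ q.toNat < (List.replicate n '?' ++ E).length)]
      rw [if_pos (by
        rw [List.getElem_append_left (by simp only [List.length_replicate]; omega)]
        simp)]
    · rw [dif_neg (by omega)]

theorem pyIntChar?_nonneg (c : Char) (n : Int) (h : pyIntChar? c = some n) : 0 ≤ n := by
  unfold pyIntChar? at h
  split_ifs at h with hd
  injection h with h'
  omega

theorem isAlpha_ne_q (c : Char) (h : c.isAlpha = true) : c ≠ '?' := by
  intro hc; subst hc; simp [Char.isAlpha] at h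

-- joint characterisation of A's expansion and B's index
theorem idxB_spec (val : List Char) : ∀ (pos : Int) (d0 : PySem.Dict Int Char),
    0 ≤ pos → (∀ p : Int, pos ≤ p → d0.get? p = none) → d0.keys.Nodup →
    (match convA val [] with
     | none => idxB val pos d0 = none
     | some E => ∃ d, idxB val pos d0 = some (pos + (E.length : Int), d) ∧ d.keys.Nodup ∧
         ∀ p : Int, d.get? p = if pos ≤ p then lAt E (p - pos) else d0.get? p) := by
  induction val with
  | nil =>
    intro pos d0 hpos h0 hnd
    simp only [convA, idxB]
    exact ⟨d0, by simp, hnd, by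
      intro p
      split_ifs with h
      · rw [h0 p h, lAt_nil]
      · rfl⟩
  | cons c rest ih =>
    intro pos d0 hpos h0 hnd
    by_cases h : c.isAlpha
    · -- letter: one position, recorded in the dict
      have hc : convA (c :: rest) [] = (convA rest []).map ([c] ++ ·) := by
        simp only [convA, if_pos h, List.nil_append]; exact convA_append rest [c]
      have hx : idxB (c :: rest) pos d0 = idxB rest (pos + 1) (d0.insert pos c) := by
        simp only [idxB, if_pos h]
      have h0' : ∀ p : Int, pos + 1 ≤ p → (d0.insert pos c).get? p = none := by
        intro p hp
        rw [PySem.Dict.get?_insert, if_neg (by omega)]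
        exact h0 p (by omega)
      have ihh := ih (pos + 1) (d0.insert pos c) (by omega) h0'
        (PySem.Dict.nodup_keys_insert d0 pos c hnd)
      cases hrest : convA rest [] with
      | none =>
        rw [hc, hrest]
        simp only [Option.map_none]
        rw [hrest] at ihh
        rw [hx]
        exact ihh
      | some E' =>
        rw [hc, hrest]
        simp only [Option.map_some]
        rw [hrest] at ihh
        obtain ⟨d, hidx, hndd, hget⟩ := ihh
        refine ⟨d, ?_, hndd, ?_⟩
        · rw [hx, hidx]
          have : pos + 1 + (E'.length : Int) = pos + (([c] ++ E').length : Int) := by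
            simp only [List.singleton_append, List.length_cons]; push_cast; ring
          rw [this]
        · intro p
          rw [hget p]
          by_cases hp1 : pos + 1 ≤ p
          · rw [if_pos hp1, if_pos (by omega)]
            simp only [List.singleton_append]
            rw [lAt_cons_succ c E' (p - pos) (by omega)]
            congr 1; ring
          · by_cases hp0 : pos ≤ p
            · have hpp : p = pos := by omega
              rw [if_neg hp1, if_pos hp0, hpp]
              rw [PySem.Dict.get?_insert, if_pos rfl]
              simp only [sub_self, List.singleton_append, lAt_cons_zero,
                if_neg (isAlpha_ne_q c h)]
            · rw [if_neg hp1, if_neg hp0]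
              rw [PySem.Dict.get?_insert, if_neg (by omega)]
    · -- digit: pos advances by its value, nothing recorded
      have hc : convA (c :: rest) [] = match pyIntChar? c with
          | none => none
          | some n => (convA rest []).map (PySem.List.pyRepeat ['?'] n ++ ·) := by
        simp only [convA, if_neg h]
        match pyIntChar? c with
        | none => rfl
        | some n => simp only [List.nil_append]; exact convA_append rest _
      match hpc : pyIntChar? c with
      | none =>
        have hpcB : pyIntCharB? c = none := hpc
        rw [hc, hpc]
        simp only [idxB, if_neg h, hpcB]
      | some n =>
        have hn0 : 0 ≤ n := pyIntChar?_nonneg c n hpc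
        have hpcB : pyIntCharB? c = some n := hpc
        have hx : idxB (c :: rest) pos d0 = idxB rest (pos + n) d0 := by
          simp only [idxB, if_neg h, hpcB]
        have ihh := ih (pos + n) d0 (by omega) (fun p hp => h0 p (by omega)) hnd
        have hc2 : convA (c :: rest) [] =
            (convA rest []).map (PySem.List.pyRepeat ['?'] n ++ ·) := by rw [hc, hpc]
        cases hrest : convA rest [] with
        | none =>
          rw [hc2, hrest]
          simp only [Option.map_none]
          rw [hrest] at ihh
          rw [hx]
          exact ihh
        | some E' =>
          rw [hc2, hrest]
          simp only [Option.map_some]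
          rw [hrest] at ihh
          obtain ⟨d, hidx, hndd, hget⟩ := ihh
          refine ⟨d, ?_, hndd, ?_⟩
          · rw [hx, hidx]
            have : pos + n + (E'.length : Int) =
                pos + ((PySem.List.pyRepeat ['?'] n ++ E').length : Int) := by
              rw [PySem.List.pyRepeat_singleton]
              simp only [List.length_append, List.length_replicate]
              omega
            rw [this]
          · intro p
            rw [hget p, PySem.List.pyRepeat_singleton]
            by_cases hp1 : pos + n ≤ p
            · rw [if_pos hp1, if_pos (by omega), lAt_rep_append]
              rw [if_pos (by omega)]
              congr 1
              ring_nf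
              omega
            · by_cases hp0 : pos ≤ p
              · rw [if_neg hp1, if_pos hp0, lAt_rep_append, if_neg (by omega)]
                exact h0 p hp0
              · rw [if_neg hp1, if_neg hp0]

theorem loopA_iff (s2 : List Char) : ∀ (s1 : List Char) (i : Int),
    loopA s2 s1 i = true ↔
      ∀ j : Nat, (h : j < s1.length) →
        ∃ d, PySem.List.pyGet? s2 (i + (j : Int)) = some d ∧
          (s1[j] = '?' ∨ d = '?' ∨ s1[j] = d) := by
  intro s1
  induction s1 with
  | nil => intro i; simp [loopA]
  | cons c rest ih =>
    intro i
    simp only [loopA]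
    cases hg : PySem.List.pyGet? s2 i with
    | none =>
      simp only [Bool.false_eq_true, false_iff, not_forall]
      refine ⟨0, by simp, ?_⟩
      rintro ⟨d, hd, _⟩
      rw [show i + ((0:Nat) : Int) = i by simp, hg] at hd
      exact absurd hd (by simp)
    | some d =>
      change (if c ≠ '?' ∧ d ≠ '?' ∧ c ≠ d then false else loopA s2 rest (i + 1)) = true ↔ _
      by_cases hcond : c ≠ '?' ∧ d ≠ '?' ∧ c ≠ d
      · rw [if_pos hcond]
        simp only [Bool.false_eq_true, false_iff, not_forall]
        refine ⟨0, by simp, ?_⟩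
        rintro ⟨d', hd', hor⟩
        rw [show i + ((0:Nat) : Int) = i by simp, hg] at hd'
        injection hd' with hdd
        subst hdd
        simp only [List.getElem_cons_zero] at hor
        tauto
      · rw [if_neg hcond, ih (i + 1)]
        push_neg at hcond
        constructor
        · intro hall j hj
          cases j with
          | zero =>
            refine ⟨d, by simpa using hg, ?_⟩
            simp only [List.getElem_cons_zero]
            by_cases h1 : c = '?'
            · exact Or.inl h1
            · by_cases h2 : d = '?'
              · exact Or.inr (Or.inl h2)
              · exact Or.inr (Or.inr (hcond h1 h2))
          | succ k =>
            obtain ⟨d', hd', hor⟩ := hall k (by simp only [List.length_cons] at hj; omega)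
            refine ⟨d', ?_, ?_⟩
            · rw [show i + ((k + 1 : Nat) : Int) = i + 1 + (k : Int) by push_cast; ring]
              exact hd'
            · simpa using hor
        · intro hall j hj
          obtain ⟨d', hd', hor⟩ := hall (j + 1) (by simp only [List.length_cons]; omega)
          refine ⟨d', ?_, ?_⟩
          · rw [show i + 1 + (j : Int) = i + ((j + 1 : Nat) : Int) by push_cast; ring]
            exact hd'
          · simpa using hor

theorem loopB_iff (d2 : PySem.Dict Int Char) : ∀ items : List (Int × Char),
    loopB d2 items = true ↔ ∀ p c, (p, c) ∈ items → ∀ q, d2.get? p = some q → q = c := by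
  intro items
  induction items with
  | nil => simp [loopB]
  | cons pc rest ih =>
    obtain ⟨p, c⟩ := pc
    simp only [loopB]
    cases h2 : d2.get? p with
    | some q =>
      change (if q ≠ c then false else loopB d2 rest) = true ↔ _
      by_cases hq : q = c
      · subst hq
        rw [if_neg (by simp), ih]
        constructor
        · rintro hall p' c' hmem q' hq'
          rcases List.mem_cons.mp hmem with heq | hmem'
          · injection heq with e1 e2; subst e1; subst e2
            rw [h2] at hq'; injection hq' with e; exact e.symm
          · exact hall p' c' hmem' q' hq'
        · intro hall p' c' hmem q' hq'
          exact hall p' c' (List.mem_cons_of_mem _ hmem) q' hq'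
      · rw [if_pos hq]
        simp only [Bool.false_eq_true, false_iff, not_forall]
        exact ⟨p, c, by simp, q, by simp [h2, hq]⟩
    | none =>
      change loopB d2 rest = true ↔ _
      rw [ih]
      constructor
      · rintro hall p' c' hmem q' hq'
        rcases List.mem_cons.mp hmem with heq | hmem'
        · injection heq with e1 e2; subst e1; subst e2
          rw [h2] at hq'; exact absurd hq' (by simp)
        · exact hall p' c' hmem' q' hq'
      · intro hall p' c' hmem q' hq'
        exact hall p' c' (List.mem_cons_of_mem _ hmem) q' hq'

theorem get?_eq_lAt {E : List Char} {d : PySem.Dict Int Char}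
    (hg : ∀ p : Int, d.get? p = if (0:Int) ≤ p then lAt E (p - 0) else PySem.Dict.empty.get? p)
    (p : Int) : d.get? p = lAt E p := by
  rw [hg p]
  by_cases h0 : (0:Int) ≤ p
  · rw [if_pos h0, sub_zero]
  · rw [if_neg h0, PySem.Dict.get?_empty]
    unfold lAt
    rw [dif_neg (by omega)]

theorem main_eq (S T : String) : solution S T = solution_alt S T := by
  have hS := idxB_spec S.toList 0 PySem.Dict.empty (le_refl 0)
    (fun p _ => PySem.Dict.get?_empty p) PySem.Dict.nodup_keys_empty
  have hT := idxB_spec T.toList 0 PySem.Dict.empty (le_refl 0)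
    (fun p _ => PySem.Dict.get?_empty p) PySem.Dict.nodup_keys_empty
  unfold solution solution_alt
  cases hcS : convA S.toList [] with
  | none =>
    rw [hcS] at hS
    rw [hS]
  | some E1 =>
    rw [hcS] at hS
    obtain ⟨d1, hi1, hnd1, hg1⟩ := hS
    rw [hi1]
    cases hcT : convA T.toList [] with
    | none => rw [hcT] at hT; rw [hT]
    | some E2 =>
      rw [hcT] at hT
      obtain ⟨d2, hi2, hnd2, hg2⟩ := hT
      rw [hi2]
      simp only [zero_add]
      by_cases hlen : (E1.length : Int) = (E2.length : Int)
      · rw [if_neg (by omega), if_neg (by omega)]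
        have hlenN : E1.length = E2.length := by exact_mod_cast hlen
        rw [Bool.eq_iff_iff, loopA_iff E2 E1 0, loopB_iff d2 d1.items]
        constructor
        · -- A's positional scan implies B's letter-map check
          intro hall p c hmem q hq
          have hc1 : d1.get? p = some c := PySem.Dict.get?_of_mem_items d1 hmem hnd1
          rw [get?_eq_lAt hg1] at hc1
          rw [get?_eq_lAt hg2] at hq
          obtain ⟨hp0, hl1, he1, hne1⟩ := (lAt_some_iff E1 p c).mp hc1
          obtain ⟨_, hl2, he2, hne2⟩ := (lAt_some_iff E2 p q).mp hq
          obtain ⟨d', hd', hor⟩ := hall p.toNat hl1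
          rw [show (0:Int) + (p.toNat : Int) = (p.toNat : Int) by ring,
            PySem.List.pyGet?_natCast, List.getElem?_eq_getElem hl2, he2] at hd'
          injection hd' with hdd
          subst hdd
          rw [he1] at hor
          rcases hor with h1 | h2 | h3
          · exact absurd h1 hne1
          · exact absurd h2 hne2
          · exact h3.symm
        · -- B's letter-map check implies A's positional scan
          intro hall j hj
          have hj2 : j < E2.length := hlenN ▸ hj
          refine ⟨E2[j], ?_, ?_⟩
          · rw [show (0:Int) + (j : Int) = (j : Int) by ring,
              PySem.List.pyGet?_natCast, List.getElem?_eq_getElem hj2]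
          · by_cases h1 : E1[j] = '?'
            · exact Or.inl h1
            · by_cases h2 : E2[j] = '?'
              · exact Or.inr (Or.inl h2)
              · refine Or.inr (Or.inr ?_)
                have hm1 : d1.get? (j : Int) = some E1[j] := by
                  rw [get?_eq_lAt hg1]
                  exact (lAt_some_iff E1 (j : Int) E1[j]).mpr
                    ⟨by omega, by simpa using hj, by simp, h1⟩
                have hm2 : d2.get? (j : Int) = some E2[j] := by
                  rw [get?_eq_lAt hg2]
                  exact (lAt_some_iff E2 (j : Int) E2[j]).mpr
                    ⟨by omega, by simpa using hj2, by simp, h2⟩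
                exact (hall (j : Int) E1[j]
                  (PySem.Dict.mem_items_of_get?_eq_some d1 hm1) E2[j] hm2).symm
      · rw [if_pos (by omega), if_pos (by omega)]

-- ===== VERDICT (by name: the statement is the Claim_ definition above) =====
theorem solution_spec : Claim_equal_solution := by
  intro S T _ _
  unfold Spec_solution
  exact main_eq S T
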